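-- pv_equiv track=rewrite | github.com/Jiayi-Xu/learn_leetcode | week10/[1370]上升下降字符串.py | sortString
-- ===== SOURCE A (Python) =====
-- def sortString(s: str) -> str:
--     # 建立26个字母数组进行计数
--     num = [0] * 26
--     for ch in s:
--         num[ord(ch) - ord('a')] += 1
--
--     res = ''
--     count = len(s)
--
--     while count:
--         for i in range(26):
--             if num[i] > 0:
--                 res += chr(i+ord('a'))
--                 num[i] -= 1
--                 count -= 1
--         for i in range(25,-1,-1):
--             if num[i] > 0:
--                 res += chr(i+ord('a'))
--                 num[i] -= 1
--                 count -= 1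
--
--     return res
-- ===== SOURCE B (Python) =====
-- def sortString(s: str) -> str:
--     # decorate-sort-undecorate: the k-th occurrence of letter i belongs to pass k,
--     # which is ascending for even k and descending for odd k; encode each occurrence
--     # as the integer k*26 + (i if k even else 25-i), sort once, decode.
--     num = [0] * 26
--     for ch in s:
--         num[ord(ch) - ord('a')] += 1
--     keys = []
--     for i in range(26):
--         for k in range(num[i]):
--             keys.append(k * 26 + (i if k % 2 == 0 else 25 - i))
--     keys.sort()
--     out = []
--     for key in keys:
--         k, j = divmod(key, 26)
--         out.append(chr((j if k % 2 == 0 else 25 - j) + 97))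
--     return ''.join(out)
-- ===== Notes on version B (the rewrite author's own statement) =====
-- stated objective: faster
-- what changed: Replaces A's repeated mutate-the-counts ascending/descending sweeps (with O(rounds) string concatenations) by decorate-sort-undecorate: each occurrence k of letter i is encoded as the single integer k*26 + (i if k even else 25-i), the key list is sorted once and decoded with one join; B never sweeps the 26 buckets round by round.
import Mathlib
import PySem

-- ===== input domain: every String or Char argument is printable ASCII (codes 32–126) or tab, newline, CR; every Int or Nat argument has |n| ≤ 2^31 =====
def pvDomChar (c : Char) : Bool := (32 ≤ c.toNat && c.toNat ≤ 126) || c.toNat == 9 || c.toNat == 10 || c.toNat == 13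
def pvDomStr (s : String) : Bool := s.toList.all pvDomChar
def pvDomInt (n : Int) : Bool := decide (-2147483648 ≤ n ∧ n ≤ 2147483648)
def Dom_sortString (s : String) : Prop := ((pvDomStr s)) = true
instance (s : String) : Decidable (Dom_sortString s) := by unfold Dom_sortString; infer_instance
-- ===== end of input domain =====

-- B replaces A's mutate-and-sweep-until-empty bucket loop by decorate-sort-undecorate:
-- each occurrence k of letter i becomes the integer key k*26+(i if k even else 25-i),
-- the keys are sorted once and decoded; measured faster in a timing run, same output.

-- ===== PORT A =====
-- chr(i + ord('a'))
def pvChr (i : Nat) : Char := Char.ofNat (i + 97)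

-- num[ord(ch) - ord('a')] += 1  for ch in s  (Python negative-index wrap; none = IndexError)
def pvBuild : List Char → List Int → Option (List Int)
  | [], num => some num
  | c :: t, num =>
    match PySem.List.pyGet? num ((c.toNat : Int) - 97) with
    | none => none
    | some v =>
      match PySem.List.pySet? num ((c.toNat : Int) - 97) (v + 1) with
      | none => none
      | some num' => pvBuild t num'

-- for i in range(26): if num[i] > 0: res += chr(i+97); num[i] -= 1
-- (structural walk over num in index order; returns the mutated num and the appended chars)
def pvAscA : List Int → Nat → List Int × List Char
  | [], _ => ([], [])
  | n :: t, i =>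
    let r := pvAscA t (i + 1)
    if 0 < n then ((n - 1) :: r.1, pvChr i :: r.2) else (n :: r.1, r.2)

-- for i in range(25,-1,-1): …  (same walk, chars appended in descending index order)
def pvDescA : List Int → Nat → List Int × List Char
  | [], _ => ([], [])
  | n :: t, i =>
    let r := pvDescA t (i + 1)
    if 0 < n then ((n - 1) :: r.1, r.2 ++ [pvChr i]) else (n :: r.1, r.2)

-- while count: …  (fuel = initial count; each iteration strictly decreases count, so it never runs out)
def pvLoopA : Nat → List Int → List Char → Int → List Char
  | 0, _, res, _ => res
  | fuel + 1, num, res, count =>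
    if count = 0 then res
    else
      let a := pvAscA num 0
      let d := pvDescA a.1 0
      pvLoopA fuel d.1 (res ++ a.2 ++ d.2) (count - a.2.length - d.2.length)

def sortString (s : String) : String :=
  match pvBuild s.toList (List.replicate 26 0) with
  | none => ""  -- IndexError (excluded by Pre_sortString)
  | some num => String.ofList (pvLoopA s.toList.length num [] (s.toList.length : Int))

-- ===== PORT B =====
-- k * 26 + (i if k % 2 == 0 else 25 - i)
def pvEnc (k i : Nat) : Int := (k : Int) * 26 + (if k % 2 = 0 then (i : Int) else 25 - (i : Int))

-- for i in range(26): for k in range(num[i]): keys.append(…)   (i < 26 < len num, so num[i] = num.getD i 0)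
def pvKeys (num : List Int) : List Int :=
  (List.range 26).foldl
    (fun keys i => keys ++ (List.range (num.getD i 0).toNat).map (fun k => pvEnc k i)) []

-- k, j = divmod(key, 26); chr((j if k % 2 == 0 else 25 - j) + 97)
def pvDec2 (key : Int) : Char :=
  let k := PySem.Int.floordiv key 26
  let j := PySem.Int.mod key 26
  Char.ofNat ((if PySem.Int.mod k 2 = 0 then j else 25 - j) + 97).toNat

def sortString_alt (s : String) : String :=
  match pvBuild s.toList (List.replicate 26 0) with
  | none => ""  -- IndexError (excluded by Pre_sortString)
  | some num =>
    String.ofList ((PySem.List.sorted (pvKeys num) (fun x => x) false).map pvDec2)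

-- ===== PRECONDITION & SPEC =====
-- Pre_ excludes exactly the inputs where `num[ord(ch)-97]` raises IndexError in A
-- (chars with code < 71 or > 122); B's identical counting line raises identically there.
def Pre_sortString (s : String) : Prop :=
  (s.toList.all (fun c => 71 ≤ c.toNat && c.toNat ≤ 122)) = true
instance (s : String) : Decidable (Pre_sortString s) := by unfold Pre_sortString; infer_instance
def pvWitness_sortString : String := "cab"

def Spec_sortString (s : String) (out : String) : Prop := out = sortString_alt s
instance (s : String) (out : String) : Decidable (Spec_sortString s out) := by unfold Spec_sortString; infer_instance

-- ===== CLAIM (what is proved, stated in full; the proofs are below) =====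
def Claim_equal_sortString : Prop := ∀ (s : String), Dom_sortString s → Pre_sortString s → Spec_sortString s (sortString s)

-- ===== LEMMAS AND PROOFS =====
-- Proof-side middle layer: the per-round threshold sweeps (round j emits letter i
-- ascending iff count i > 2j, descending iff count i > 2j+1); A's loop and B's
-- sorted key list are each proved equal to this formulation.
def pvAscB : List Int → Int → Nat → List Char
  | [], _, _ => []
  | n :: t, th, i => (if th < n then [pvChr i] else []) ++ pvAscB t th (i + 1)

def pvDescB : List Int → Int → Nat → List Char
  | [], _, _ => []
  | n :: t, th, i => pvDescB t th (i + 1) ++ (if th < n then [pvChr i] else [])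

def pvRoundsB (num : List Int) (rounds : Nat) : List Char :=
  (List.range rounds).foldl
    (fun res (j : Nat) => res ++ (pvAscB num (2 * (j : Int)) 0 ++ pvDescB num (2 * (j : Int) + 1) 0)) []

-- one A-decrement: n -= 1 if n > 0
def pvDec (n : Int) : Int := if 0 < n then n - 1 else n
-- proof-side maximum (= max(num) for nonneg lists)
def pvM (num : List Int) : Int := num.foldr max 0
-- proof-side round count
def pvR (m : Int) : Nat := (PySem.Int.floordiv (m + 1) 2).toNat

theorem pvAscA_eq (num : List Int) (i : Nat) :
    pvAscA num i = (num.map pvDec, pvAscB num 0 i) := by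
  induction num generalizing i with
  | nil => rfl
  | cons n t ih =>
    simp only [pvAscA, pvAscB, ih, pvDec, List.map_cons]
    split <;> simp

theorem pvDescA_eq (num : List Int) (i : Nat) :
    pvDescA num i = (num.map pvDec, pvDescB num 0 i) := by
  induction num generalizing i with
  | nil => rfl
  | cons n t ih =>
    simp only [pvDescA, pvDescB, ih, pvDec, List.map_cons]
    split <;> simp

theorem pvAscB_shift (num : List Int) (th : Int) (i : Nat) (hth : 0 ≤ th)
    (h : ∀ n ∈ num, 0 ≤ n) :
    pvAscB (num.map pvDec) th i = pvAscB num (th + 1) i := by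
  induction num generalizing i with
  | nil => rfl
  | cons n t ih =>
    have hn := h n (by simp)
    have hcond : th < pvDec n ↔ th + 1 < n := by simp only [pvDec]; split <;> omega
    simp only [List.map_cons, pvAscB, ih (i + 1) (fun m hm => h m (by simp [hm])), hcond]

theorem pvDescB_shift (num : List Int) (th : Int) (i : Nat) (hth : 0 ≤ th)
    (h : ∀ n ∈ num, 0 ≤ n) :
    pvDescB (num.map pvDec) th i = pvDescB num (th + 1) i := by
  induction num generalizing i with
  | nil => rfl
  | cons n t ih =>
    have hn := h n (by simp)
    have hcond : th < pvDec n ↔ th + 1 < n := by simp only [pvDec]; split <;> omega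
    simp only [List.map_cons, pvDescB, ih (i + 1) (fun m hm => h m (by simp [hm])), hcond]

theorem pv_sum_dec_asc (num : List Int) (i : Nat) :
    (num.map pvDec).sum + ((pvAscB num 0 i).length : Int) = num.sum := by
  induction num generalizing i with
  | nil => rfl
  | cons n t ih =>
    have := ih (i + 1)
    simp only [List.map_cons, pvAscB, List.sum_cons, List.length_append, pvDec]
    split <;> simp only [List.length_cons, List.length_nil] <;> push_cast <;> omega

theorem pv_sum_dec_desc (num : List Int) (i : Nat) :
    (num.map pvDec).sum + ((pvDescB num 0 i).length : Int) = num.sum := by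
  induction num generalizing i with
  | nil => rfl
  | cons n t ih =>
    have := ih (i + 1)
    simp only [List.map_cons, pvDescB, List.sum_cons, List.length_append, pvDec]
    split <;> simp only [List.length_cons, List.length_nil] <;> push_cast <;> omega

theorem pv_nonneg_dec {num : List Int} (h : ∀ n ∈ num, 0 ≤ n) :
    ∀ n ∈ num.map pvDec, 0 ≤ n := by
  intro n hn
  rcases List.mem_map.1 hn with ⟨m, hm, rfl⟩
  have := h m hm
  simp only [pvDec]; split <;> omega

theorem pvM_nonneg (num : List Int) : 0 ≤ pvM num := by
  induction num with
  | nil => simp [pvM]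
  | cons n t ih => simp only [pvM, List.foldr_cons] at *; omega

theorem pv_sum_zero_iff {num : List Int} (h : ∀ n ∈ num, 0 ≤ n) :
    num.sum = 0 ↔ pvM num = 0 := by
  induction num with
  | nil => simp [pvM]
  | cons n t ih =>
    have hn := h n (by simp)
    have ht := ih (fun m hm => h m (by simp [hm]))
    have hs : 0 ≤ t.sum := List.sum_nonneg (fun m hm => h m (by simp [hm]))
    have hM := pvM_nonneg t
    simp only [List.sum_cons, pvM, List.foldr_cons] at *
    constructor <;> intro <;> omega

theorem pv_sum_dec_le (num : List Int) : (num.map pvDec).sum ≤ num.sum := by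
  induction num with
  | nil => simp
  | cons n t ih =>
    simp only [List.map_cons, List.sum_cons, pvDec]
    split <;> omega

theorem pv_sum_dec_lt {num : List Int} (h : ∀ n ∈ num, 0 ≤ n) (hs : 0 < num.sum) :
    (num.map pvDec).sum < num.sum := by
  induction num with
  | nil => simp at hs
  | cons n t ih =>
    have hn := h n (by simp)
    have ht := pv_sum_dec_le t
    by_cases hpos : 0 < n
    · simp only [List.map_cons, List.sum_cons, pvDec, if_pos hpos]; omega
    · have hn0 : n = 0 := by omega
      have hst : 0 < t.sum := by simp only [List.sum_cons] at hs; omega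
      have := ih (fun m hm => h m (by simp [hm])) hst
      simp only [List.map_cons, List.sum_cons, pvDec, if_neg hpos]; omega

theorem pvM_decdec {num : List Int} (h : ∀ n ∈ num, 0 ≤ n) :
    pvM ((num.map pvDec).map pvDec) = max (pvM num - 2) 0 := by
  induction num with
  | nil => simp [pvM]
  | cons n t ih =>
    have hn := h n (by simp)
    have ht := ih (fun m hm => h m (by simp [hm]))
    have hM := pvM_nonneg t
    have hMd := pvM_nonneg ((t.map pvDec).map pvDec)
    simp only [List.map_cons, pvM, List.foldr_cons] at *
    rw [ht]
    simp only [pvDec]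
    split <;> (try split) <;> omega

theorem pvR_zero : pvR 0 = 0 := by decide

theorem pvR_succ {m : Int} (hm : 0 < m) :
    pvR (max (m - 2) 0) = pvR m - 1 ∧ 1 ≤ pvR m := by
  unfold pvR
  rw [PySem.Int.floordiv_eq_ediv_of_pos (by norm_num), PySem.Int.floordiv_eq_ediv_of_pos (by norm_num)]
  omega

theorem pvRoundsB_eq_flatMap (num : List Int) (R : Nat) :
    pvRoundsB num R =
      (List.range R).flatMap (fun (j : Nat) => pvAscB num (2 * (j : Int)) 0 ++ pvDescB num (2 * (j : Int) + 1) 0) := by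
  unfold pvRoundsB
  rw [PySem.List.foldl_append_eq_flatMap]
  simp

theorem pvRoundsB_step {num : List Int} (h : ∀ n ∈ num, 0 ≤ n) {R : Nat} (hR : 1 ≤ R) :
    pvRoundsB num R =
      pvAscB num 0 0 ++ pvDescB num 1 0 ++ pvRoundsB ((num.map pvDec).map pvDec) (R - 1) := by
  obtain ⟨k, rfl⟩ : ∃ k, R = k + 1 := ⟨R - 1, by omega⟩
  rw [pvRoundsB_eq_flatMap, pvRoundsB_eq_flatMap, List.range_succ_eq_map, List.flatMap_cons, List.flatMap_map]
  have hdd := pv_nonneg_dec h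
  have hfun : (fun (a : Nat) => pvAscB num (2 * ((a.succ : Nat) : Int)) 0 ++ pvDescB num (2 * ((a.succ : Nat) : Int) + 1) 0)
      = fun (j : Nat) => pvAscB ((num.map pvDec).map pvDec) (2 * (j : Int)) 0 ++
          pvDescB ((num.map pvDec).map pvDec) (2 * (j : Int) + 1) 0 := by
    funext j
    push_cast
    have e1 : (2 * ((j : Int) + 1)) = (2 * (j : Int) + 1) + 1 := by ring
    rw [e1,
      ← pvAscB_shift num (2 * (j : Int) + 1) 0 (by positivity) h,
      ← pvAscB_shift (num.map pvDec) (2 * (j : Int)) 0 (by positivity) hdd,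
      ← pvDescB_shift num (2 * (j : Int) + 1 + 1) 0 (by positivity) h,
      ← pvDescB_shift (num.map pvDec) (2 * (j : Int) + 1) 0 (by positivity) hdd]
  rw [hfun]
  simp [List.append_assoc]

theorem pv_main (fuel : Nat) (num : List Int) (res : List Char)
    (h : ∀ n ∈ num, 0 ≤ n) (hf : num.sum ≤ (fuel : Int)) :
    pvLoopA fuel num res num.sum = res ++ pvRoundsB num (pvR (pvM num)) := by
  induction fuel generalizing num res with
  | zero =>
    have hs : num.sum = 0 := le_antisymm (by exact_mod_cast hf) (List.sum_nonneg h)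
    have hM : pvM num = 0 := (pv_sum_zero_iff h).1 hs
    simp [pvLoopA, hM, pvR_zero, pvRoundsB]
  | succ fuel ih =>
    by_cases hs : num.sum = 0
    · have hM : pvM num = 0 := (pv_sum_zero_iff h).1 hs
      simp [pvLoopA, hs, hM, pvR_zero, pvRoundsB]
    · have hspos : 0 < num.sum := lt_of_le_of_ne (List.sum_nonneg h) (Ne.symm hs)
      have hMpos : 0 < pvM num := by
        have := pvM_nonneg num
        rcases lt_or_eq_of_le this with h' | h'
        · exact h'
        · exact absurd ((pv_sum_zero_iff h).2 h'.symm) hs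
      rw [pvLoopA, if_neg hs]
      simp only [pvAscA_eq, pvDescA_eq]
      have hdd := pv_nonneg_dec h
      have hddd := pv_nonneg_dec hdd
      have hc : num.sum - ((pvAscB num 0 0).length : Int) - ((pvDescB (num.map pvDec) 0 0).length : Int)
          = ((num.map pvDec).map pvDec).sum := by
        have h1 := pv_sum_dec_asc num 0
        have h2 := pv_sum_dec_desc (num.map pvDec) 0
        omega
      have hlt : ((num.map pvDec).map pvDec).sum < num.sum := by
        have h1 := pv_sum_dec_lt h hspos
        have h2 : (((num.map pvDec).map pvDec)).sum ≤ (num.map pvDec).sum := by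
          have := pv_sum_dec_asc (num.map pvDec) 0
          omega
        omega
      rw [hc, ih ((num.map pvDec).map pvDec) _ hddd (by omega)]
      rw [pvDescB_shift num 0 0 le_rfl h]
      rw [pvRoundsB_step h (pvR_succ hMpos).2, pvM_decdec h, (pvR_succ hMpos).1]
      simp [List.append_assoc]

-- build: under Pre_, counting succeeds, keeps length 26, entries nonneg, and adds len cs to the sum
theorem pv_build_ok (cs : List Char) (num0 : List Int)
    (hlen : num0.length = 26) (hnn : ∀ n ∈ num0, 0 ≤ n)
    (hcs : ∀ c ∈ cs, 71 ≤ c.toNat ∧ c.toNat ≤ 122) :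
    ∃ num, pvBuild cs num0 = some num ∧ num.length = 26 ∧ (∀ n ∈ num, 0 ≤ n) ∧
      num.sum = num0.sum + cs.length := by
  induction cs generalizing num0 with
  | nil => exact ⟨num0, rfl, hlen, hnn, by simp⟩
  | cons c t ih =>
    have hc := hcs c (by simp)
    set K : Nat := if c.toNat < 97 then 26 - (97 - c.toNat) else c.toNat - 97 with hKdef
    have hKlt : K < num0.length := by rw [hlen, hKdef]; split_ifs <;> omega
    have hK : PySem.List.pyIdx? num0.length ((c.toNat : Int) - 97) = some K := by
      simp only [PySem.List.pyIdx?, hlen, hKdef]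
      split_ifs <;> (congr 1; omega)
    have hget : PySem.List.pyGet? num0 ((c.toNat : Int) - 97) = some num0[K] := by
      simp only [PySem.List.pyGet?, hK, Option.bind_some, List.getElem?_eq_getElem hKlt]
    have hset : PySem.List.pySet? num0 ((c.toNat : Int) - 97) (num0[K] + 1)
        = some (num0.set K (num0[K] + 1)) := by
      simp only [PySem.List.pySet?, hK, Option.map_some]
    have hsplit : num0.sum = (num0.take K).sum + (num0[K] + (num0.drop (K + 1)).sum) := by
      have h1 := List.sum_take_add_sum_drop num0 K
      rw [List.drop_eq_getElem_cons hKlt, List.sum_cons] at h1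
      omega
    have hsumset : (num0.set K (num0[K] + 1)).sum = num0.sum + 1 := by
      rw [List.sum_set, if_pos hKlt]
      omega
    have hnn' : ∀ n ∈ num0.set K (num0[K] + 1), 0 ≤ n := by
      intro n hn
      rcases List.mem_or_eq_of_mem_set hn with hmem | rfl
      · exact hnn n hmem
      · have := hnn num0[K] (num0.getElem_mem hKlt)
        omega
    obtain ⟨num, hbt, h1, h2, h3⟩ :=
      ih (num0.set K (num0[K] + 1)) (by simp [hlen]) hnn' (fun x hx => hcs x (by simp [hx]))
    refine ⟨num, ?_, h1, h2, ?_⟩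
    · simp only [pvBuild, hget, hset]
      exact hbt
    · rw [h3, hsumset]
      simp only [List.length_cons]
      push_cast
      ring

-- ===== B-side bridge: sorted key list = the threshold rounds =====

-- the encoded letter slot of pass k, position j
def pvIdx (k j : Nat) : Nat := if k % 2 = 0 then j else 25 - j

-- the keys of pass k, in sorted (ascending-key) order
def pvPassK (num : List Int) (k : Nat) : List Int :=
  (List.range 26).filterMap (fun j =>
    if (k : Int) < num.getD (pvIdx k j) 0 then some ((k : Int) * 26 + (j : Int)) else none)

-- all keys of the first P passes, in sorted order
def pvT (num : List Int) (P : Nat) : List Int := (List.range P).flatMap (pvPassK num)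

theorem pvEnc_mem_passK {num : List Int} {k i : Nat} (hi : i < 26)
    (hk : (k : Int) < num.getD i 0) :
    pvEnc k i = (k : Int) * 26 + ((pvIdx k i : Nat) : Int) ∧ pvIdx k (pvIdx k i) = i := by
  unfold pvEnc pvIdx
  constructor
  · split <;> push_cast <;> omega
  · split <;> omega

-- membership in pvKeys
theorem pv_mem_keys {num : List Int} {x : Int} :
    x ∈ pvKeys num ↔ ∃ i < 26, ∃ k : Nat, (k : Int) < num.getD i 0 ∧ x = pvEnc k i := by
  unfold pvKeys
  rw [PySem.List.foldl_append_eq_flatMap]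
  simp only [List.nil_append, List.mem_flatMap, List.mem_map, List.mem_range]
  constructor
  · rintro ⟨i, hi, k, hk, rfl⟩
    exact ⟨i, hi, k, by omega, rfl⟩
  · rintro ⟨i, hi, k, hk, rfl⟩
    exact ⟨i, hi, k, by omega, rfl⟩

-- membership in pvT
theorem pv_mem_T {num : List Int} {P : Nat} {x : Int} :
    x ∈ pvT num P ↔ ∃ k < P, ∃ j < 26, (k : Int) < num.getD (pvIdx k j) 0 ∧
      x = (k : Int) * 26 + (j : Int) := by
  unfold pvT pvPassK
  simp only [List.mem_flatMap, List.mem_filterMap, List.mem_range]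
  constructor
  · rintro ⟨k, hk, j, hj, hx⟩
    split at hx
    · exact ⟨k, hk, j, hj, ‹_›, (Option.some_injective _ hx).symm⟩
    · exact absurd hx (by simp)
  · rintro ⟨k, hk, j, hj, hc, rfl⟩
    exact ⟨k, hk, j, hj, by rw [if_pos hc]⟩

theorem pv_getD_le_M (num : List Int) (i : Nat) : num.getD i 0 ≤ pvM num := by
  induction num generalizing i with
  | nil => simp [pvM]
  | cons n t ih =>
    cases i with
    | zero =>
      have := pvM_nonneg t
      simp only [List.getD_cons_zero, pvM, List.foldr_cons]
      omega
    | succ i =>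
      have := ih i
      simp only [List.getD_cons_succ, pvM, List.foldr_cons] at *
      omega

theorem pvM_le_twoR (num : List Int) : pvM num ≤ 2 * (pvR (pvM num) : Int) := by
  have := pvM_nonneg num
  unfold pvR
  rw [PySem.Int.floordiv_eq_ediv_of_pos (by norm_num)]
  omega

-- the two key sets coincide (for P = 2 * pvR (pvM num))
theorem pv_keys_mem_iff (num : List Int) (x : Int) :
    x ∈ pvKeys num ↔ x ∈ pvT num (2 * pvR (pvM num)) := by
  rw [pv_mem_keys, pv_mem_T]
  constructor
  · rintro ⟨i, hi, k, hk, rfl⟩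
    obtain ⟨he, hidx⟩ := pvEnc_mem_passK hi hk
    refine ⟨k, ?_, pvIdx k i, by unfold pvIdx; split <;> omega, by rw [hidx]; exact hk, he⟩
    have h1 := pv_getD_le_M num i
    have h2 := pvM_le_twoR num
    omega
  · rintro ⟨k, hk, j, hj, hc, rfl⟩
    refine ⟨pvIdx k j, by unfold pvIdx; split <;> omega, k, hc, ?_⟩
    unfold pvEnc pvIdx
    unfold pvIdx at hc
    split <;> push_cast <;> omega

-- bounds of pass-k keys
theorem pv_passK_bounds {num : List Int} {k : Nat} {x : Int} (hx : x ∈ pvPassK num k) :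
    (k : Int) * 26 ≤ x ∧ x < (k : Int) * 26 + 26 := by
  unfold pvPassK at hx
  simp only [List.mem_filterMap, List.mem_range] at hx
  obtain ⟨j, hj, hif⟩ := hx
  split at hif
  · obtain rfl := Option.some_injective _ hif
    push_cast
    omega
  · exact absurd hif (by simp)

theorem pv_passK_pairwise (num : List Int) (k : Nat) : (pvPassK num k).Pairwise (· < ·) := by
  refine List.Pairwise.filterMap _ ?_ List.pairwise_lt_range
  intro a b hab x hx y hy
  split at hx
  · split at hy
    · simp only [Option.some_inj] at hx hy
      subst hx; subst hy
      omega
    · simp at hy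
  · simp at hx

theorem pv_T_pairwise (num : List Int) (P : Nat) : (pvT num P).Pairwise (· < ·) := by
  induction P with
  | zero => simp [pvT]
  | succ P ih =>
    unfold pvT at *
    rw [List.range_succ, List.flatMap_append, List.flatMap_singleton]
    rw [List.pairwise_append]
    refine ⟨ih, pv_passK_pairwise num P, ?_⟩
    intro x hx y hy
    simp only [List.mem_flatMap, List.mem_range] at hx
    obtain ⟨k, hk, hxk⟩ := hx
    have h1 := pv_passK_bounds hxk
    have h2 := pv_passK_bounds hy
    have : (k : Int) * 26 + 26 ≤ (P : Int) * 26 := by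
      have : (k : Int) + 1 ≤ P := by exact_mod_cast hk
      nlinarith
    omega

-- pvKeys has no duplicates: a key determines (k, i)
theorem pv_keys_nodup (num : List Int) : (pvKeys num).Nodup := by
  unfold pvKeys
  rw [PySem.List.foldl_append_eq_flatMap]
  simp only [List.nil_append]
  rw [List.nodup_flatMap]
  constructor
  · intro i hi
    refine List.Nodup.map_on ?_ List.nodup_range
    intro k1 h1 k2 h2 he
    simp only [List.mem_range] at hi
    unfold pvEnc at he
    have b1 : (0 : Int) ≤ (if k1 % 2 = 0 then (i : Int) else 25 - i) ∧
        (if k1 % 2 = 0 then (i : Int) else 25 - i) < 26 := by split <;> push_cast <;> omega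
    have b2 : (0 : Int) ≤ (if k2 % 2 = 0 then (i : Int) else 25 - i) ∧
        (if k2 % 2 = 0 then (i : Int) else 25 - i) < 26 := by split <;> push_cast <;> omega
    omega
  · refine List.Pairwise.imp_of_mem ?_ List.pairwise_lt_range
    intro i1 i2 h1 h2 hlt x hx1 hx2
    rw [List.mem_range] at h1 h2
    simp only [List.mem_map, List.mem_range] at hx1 hx2
    obtain ⟨k1, _, he1⟩ := hx1
    obtain ⟨k2, _, he2⟩ := hx2
    rw [← he1] at he2
    unfold pvEnc at he2
    have b1 : (0 : Int) ≤ (if k1 % 2 = 0 then (i1 : Int) else 25 - i1) ∧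
        (if k1 % 2 = 0 then (i1 : Int) else 25 - i1) < 26 := by split <;> push_cast <;> omega
    have b2 : (0 : Int) ≤ (if k2 % 2 = 0 then (i2 : Int) else 25 - i2) ∧
        (if k2 % 2 = 0 then (i2 : Int) else 25 - i2) < 26 := by split <;> push_cast <;> omega
    have hkk : k1 = k2 := by omega
    subst hkk
    have : (if k1 % 2 = 0 then (i1 : Int) else 25 - i1) = (if k1 % 2 = 0 then (i2 : Int) else 25 - i2) := by omega
    split at this <;> omega

theorem pv_sorted_keys (num : List Int) :
    PySem.List.sorted (pvKeys num) (fun x => x) false = pvT num (2 * pvR (pvM num)) := by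
  apply PySem.List.sorted_eq_of_perm_of_pairwise_lt
  · rw [List.perm_ext_iff_of_nodup ((pv_T_pairwise num _).imp ne_of_lt) (pv_keys_nodup num)]
    intro x
    rw [pv_keys_mem_iff]
  · exact pv_T_pairwise num _

-- ===== decoding the sorted keys gives the rounds =====

theorem pv_dec2_enc (k j : Nat) (hj : j < 26) :
    pvDec2 ((k : Int) * 26 + (j : Int)) = pvChr (pvIdx k j) := by
  have hfd : PySem.Int.floordiv ((k : Int) * 26 + (j : Int)) 26 = (k : Int) := by
    rw [PySem.Int.floordiv_eq_iff_of_pos (by norm_num)]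
    push_cast
    omega
  have hmd : PySem.Int.mod ((k : Int) * 26 + (j : Int)) 26 = (j : Int) := by
    rw [PySem.Int.mod_eq_emod_of_pos (by norm_num)]
    have h : ((k : Int) * 26 + (j : Int)) = (j : Int) + (k : Int) * 26 := by ring
    rw [h, Int.add_mul_emod_self_right]
    exact Int.emod_eq_of_lt (by positivity) (by exact_mod_cast hj)
  have hm2 : PySem.Int.mod (k : Int) 2 = ((k % 2 : Nat) : Int) :=
    PySem.Int.mod_natCast k 2
  simp only [pvDec2, hfd, hmd, hm2, Nat.cast_eq_zero, pvChr, pvIdx]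
  split <;> (congr 1 <;> omega)

theorem pvAscB_eq_filterMap (num : List Int) (th : Int) (i : Nat) :
    pvAscB num th i =
      (List.range num.length).filterMap
        (fun r => if th < num.getD r 0 then some (pvChr (i + r)) else none) := by
  induction num generalizing i with
  | nil => rfl
  | cons n t ih =>
    rw [List.length_cons, List.range_succ_eq_map, List.filterMap_cons, List.filterMap_map]
    have hfun : ((fun r => if th < (n :: t).getD r 0 then some (pvChr (i + r)) else none) ∘ Nat.succ)
        = fun r => if th < t.getD r 0 then some (pvChr ((i + 1) + r)) else none := by
      funext r
      have he : i + Nat.succ r = (i + 1) + r := by omega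
      simp only [Function.comp_def, List.getD_cons_succ, he]
    rw [hfun, ← ih]
    simp only [pvAscB, List.getD_cons_zero, Nat.add_zero]
    split <;> simp

theorem pvDescB_eq_reverse (num : List Int) (th : Int) (i : Nat) :
    pvDescB num th i = (pvAscB num th i).reverse := by
  induction num generalizing i with
  | nil => rfl
  | cons n t ih =>
    simp only [pvDescB, pvAscB, List.reverse_append, ih]
    congr 1
    split <;> simp

theorem pv_range26_rev : (List.range 26).reverse = (List.range 26).map (fun j => 25 - j) := by
  decide

theorem pv_passK_map (num : List Int) (hlen : num.length = 26) (k : Nat) :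
    (pvPassK num k).map pvDec2 =
      if k % 2 = 0 then pvAscB num (k : Int) 0 else pvDescB num (k : Int) 0 := by
  have hasc := pvAscB_eq_filterMap num (k : Int) 0
  rw [hlen] at hasc
  unfold pvPassK
  rw [List.map_filterMap]
  have hstep : ∀ j ∈ List.range 26,
      (if (k : Int) < num.getD (pvIdx k j) 0 then some ((k : Int) * 26 + (j : Int)) else none).map pvDec2
      = if (k : Int) < num.getD (pvIdx k j) 0 then some (pvChr (pvIdx k j)) else none := by
    intro j hj
    rw [List.mem_range] at hj
    split
    · rw [Option.map_some, pv_dec2_enc k j hj]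
    · rfl
  rw [List.filterMap_congr hstep]
  by_cases he : k % 2 = 0
  · rw [if_pos he, hasc]
    refine List.filterMap_congr ?_
    intro j hj
    simp only [pvIdx, if_pos he, Nat.zero_add]
  · rw [if_neg he, pvDescB_eq_reverse, hasc, ← List.filterMap_reverse, pv_range26_rev,
      List.filterMap_map]
    refine List.filterMap_congr ?_
    intro j hj
    simp only [Function.comp_def, pvIdx, if_neg he, Nat.zero_add]

theorem pv_T_map (num : List Int) (hlen : num.length = 26) (R : Nat) :
    (pvT num (2 * R)).map pvDec2 = pvRoundsB num R := by
  induction R with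
  | zero => simp [pvT, pvRoundsB]
  | succ R ih =>
    have h2 : 2 * (R + 1) = (2 * R) + 1 + 1 := by ring
    have heven : (2 * R) % 2 = 0 := by omega
    have hodd : (2 * R + 1) % 2 ≠ 0 := by omega
    unfold pvT at *
    rw [h2, List.range_succ, List.range_succ, List.flatMap_append, List.flatMap_append,
      List.flatMap_singleton, List.flatMap_singleton, List.map_append, List.map_append, ih,
      pv_passK_map num hlen, pv_passK_map num hlen, if_pos heven, if_neg hodd,
      pvRoundsB_eq_flatMap, pvRoundsB_eq_flatMap, List.range_succ, List.flatMap_append,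
      List.flatMap_singleton]
    push_cast
    simp [List.append_assoc]

theorem pv_final (s : String) (hp : ∀ c ∈ s.toList, 71 ≤ c.toNat ∧ c.toNat ≤ 122) :
    sortString s = sortString_alt s := by
  obtain ⟨num, hb, hlen, hnn, hsum⟩ :=
    pv_build_ok s.toList (List.replicate 26 0) (by simp) (by simp) hp
  have hsum' : num.sum = (s.toList.length : Int) := by simpa using hsum
  have hA : sortString s = String.ofList (pvLoopA s.toList.length num [] (s.toList.length : Int)) := by
    simp only [sortString, hb]
  have hB : sortString_alt s
      = String.ofList ((PySem.List.sorted (pvKeys num) (fun x => x) false).map pvDec2) := by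
    simp only [sortString_alt, hb]
  have hmain := pv_main s.toList.length num [] hnn (le_of_eq hsum')
  rw [hsum'] at hmain
  rw [hA, hB, hmain, pv_sorted_keys num, pv_T_map num hlen (pvR (pvM num))]
  simp

-- ===== VERDICT (by name: the statement is the Claim_ definition above) =====
theorem sortString_spec : Claim_equal_sortString := by
  intro s _ hp
  unfold Spec_sortString
  refine pv_final s ?_
  intro c hc
  have := (List.all_eq_true.1 hp) c hc
  simpa using this
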